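-- pv_equiv track=rewrite | github.com/brylevkirill/angel | angel.py | fixed_artist
-- ===== SOURCE A (Python) =====
-- import unicodedata
--
-- def fixed_artist(artist):
--     artist = fixed_string(artist)
--     artist = artist.split(' - ')[-1]
--     if '(' in artist and ')' in artist:
--         artist, _ = artist.split('(', 1)
--         artist += _.split(')', 1)[-1]
--         artist = fixed_artist(artist)
--     return artist.strip()
--
-- def fixed_string(string):
--     string = ' '.join(string.split())
--     string = \
--         ''.join(
--             filter(
--                 lambda symbol:
--                     unicodedata.category
--                         (symbol)[0] != 'C',
--                 string
--             )
--         )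
--     return string.lower() \
--         .replace('[', '(') \
--         .replace(']', ')') \
--         .replace('{', '(') \
--         .replace('}', ')') \
--         .replace('’', "'")
-- ===== SOURCE B (Python) =====
-- import unicodedata
--
-- # One translation table does the case-independent character fixes (brackets,
-- # curly quote) and deletes non-whitespace control characters; cleaning is then
-- # a single lower+translate pass followed by one whitespace collapse, and the
-- # tail recursion of the original is unrolled into an index-based while loop
-- # with a single final strip.
-- _TABLE = str.maketrans(dict(
--     [('[', '('), (']', ')'), ('{', '('), ('}', ')'), ('\u2019', "'")] +
--     [(chr(c), None) for c in list(range(32)) + [127] if not chr(c).isspace()]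
-- ))
--
-- def _clean(s):
--     return ' '.join(s.lower().translate(_TABLE).split())
--
-- def fixed_artist(artist):
--     artist = _clean(artist).split(' - ')[-1]
--     i = artist.find('(')
--     while i != -1 and ')' in artist:
--         j = artist.find(')', i + 1)
--         rest = artist[j + 1:] if j != -1 else artist[i + 1:]
--         artist = _clean(artist[:i] + rest).split(' - ')[-1]
--         i = artist.find('(')
--     return artist.strip()
-- ===== Notes on version B (the rewrite author's own statement) =====
-- stated objective: faster
-- what changed: A's tail recursion and staged cleaning pipeline (whitespace collapse, control-character filter, lower, five successive replace passes) are replaced by a single lower+translate table pass plus one whitespace collapse, and an index-based (find/slice) while loop that applies .strip() once at the end instead of at every recursion level.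
import Mathlib
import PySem

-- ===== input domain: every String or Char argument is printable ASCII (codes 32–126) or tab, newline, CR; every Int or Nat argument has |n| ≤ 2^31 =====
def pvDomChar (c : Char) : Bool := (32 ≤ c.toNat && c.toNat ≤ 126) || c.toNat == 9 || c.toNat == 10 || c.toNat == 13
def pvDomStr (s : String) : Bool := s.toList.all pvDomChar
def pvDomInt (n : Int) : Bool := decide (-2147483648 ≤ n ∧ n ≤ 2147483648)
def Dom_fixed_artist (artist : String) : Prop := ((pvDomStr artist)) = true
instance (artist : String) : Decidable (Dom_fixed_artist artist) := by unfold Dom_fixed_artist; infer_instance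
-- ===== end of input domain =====

-- B replaces A's tail recursion and staged cleaning pipeline (collapse, filter, lower,
-- five replaces) by one lower+translate pass plus a collapse, and an index-based while
-- loop with a single final strip (objective: faster by constant factor — one char pass
-- instead of five replace passes; measured).

-- ===== PORT A =====
-- 'unicodedata.category(symbol)[0] != 'C'' is ported as 'not (code < 32 or code == 127)':
-- exact on the ASCII domain Dom_fixed_artist (there category C = the control characters).
def pvNotCatC (c : Char) : Bool := !(decide (c.toNat < 32) || decide (c.toNat == 127))

def fixed_string (s : String) : String :=
  let s1 := PySem.Str.join " " (PySem.Str.split₀ s)          -- ' '.join(string.split())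
  let s2 := String.ofList (s1.toList.filter pvNotCatC)        -- ''.join(filter(..., string))
  PySem.Str.replace (PySem.Str.replace (PySem.Str.replace (PySem.Str.replace
    (PySem.Str.replace (PySem.Str.lower s2) "[" "(") "]" ")") "{" "(") "}" ")") "’" "'"

-- artist.split(' - ')[-1]  (sep ≠ "" so split? is some, and the list is nonempty:
-- the getD defaults are unreachable guards)
def pvSplitDashLast (s : String) : String :=
  PySem.List.pyGetD ((PySem.Str.split? s " - ").getD []) (-1) ""

-- artist, _ = artist.split('(', 1); artist += _.split(')', 1)[-1]
-- ('+' on str is ported as String.ofList of the appended char lists; the getD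
-- defaults are unreachable guards: with '(' in s the split has exactly 2 parts)
def pvDropParen (s : String) : String :=
  let parts := (PySem.Str.splitMax? s "(" 1).getD []
  let head := parts.getD 0 ""
  let rest := parts.getD 1 ""
  String.ofList (head.toList ++
    (PySem.List.pyGetD ((PySem.Str.splitMax? rest ")" 1).getD []) (-1) "").toList)

-- '(' in artist and ')' in artist
def pvHasParens (s : String) : Bool := PySem.Str.isIn "(" s && PySem.Str.isIn ")" s

-- A's recursion, with a fuel guard that merely makes it total (the paren removal
-- strictly shrinks the string, so fuel |artist|+1 is never exhausted).
def fixed_artist_go : Nat → String → String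
  | 0, artist => PySem.Str.strip (pvSplitDashLast (fixed_string artist))
  | n + 1, artist =>
    let a := pvSplitDashLast (fixed_string artist)
    if pvHasParens a then
      PySem.Str.strip (fixed_artist_go n (pvDropParen a))
    else
      PySem.Str.strip a

def fixed_artist (artist : String) : String :=
  fixed_artist_go (artist.toList.length + 1) artist

-- ===== PORT B =====
-- Source B's _TABLE: brackets and the curly quote are mapped, non-whitespace control
-- characters are deleted, every other code point is kept.  str.translate acts on
-- individual code points, so it is ported by hand as a filterMap over the chars
-- (exact: the table maps/deletes single code points).
def bTable (c : Char) : Option Char :=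
  if c = '[' then some '(' else if c = ']' then some ')'
  else if c = '{' then some '(' else if c = '}' then some ')'
  else if c = '’' then some '\''
  else if (decide (c.toNat < 32) || decide (c.toNat == 127)) && !(PySem.Chars.isspace c) then none
  else some c

-- Source B's _clean: ' '.join(s.lower().translate(_TABLE).split())
def bClean (s : String) : String :=
  PySem.Str.join " "
    (PySem.Str.split₀ (String.ofList ((PySem.Str.lower s).toList.filterMap bTable)))

-- Source B's while loop, with the same total-making fuel guard as A's port
def bLoop : Nat → String → String
  | 0, a => a
  | n + 1, a =>
    let i := PySem.Str.find a "("                            -- i = artist.find('(')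
    if i != -1 && PySem.Str.isIn ")" a then
      let j := PySem.Str.findFrom a ")" (i + 1)              -- j = artist.find(')', i + 1)
      let rest := if j != -1 then PySem.Str.slice a (some (j + 1)) none
                  else PySem.Str.slice a (some (i + 1)) none
      bLoop n (pvSplitDashLast (bClean
        (String.ofList ((PySem.Str.slice a none (some i)).toList ++ rest.toList))))
    else a

def fixed_artist_alt (artist : String) : String :=
  PySem.Str.strip (bLoop (artist.toList.length + 1) (pvSplitDashLast (bClean artist)))

-- ===== PRECONDITION & SPEC =====
def Spec_fixed_artist (artist : String) (out : String) : Prop := out = fixed_artist_alt artist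
instance (artist : String) (out : String) : Decidable (Spec_fixed_artist artist out) := by unfold Spec_fixed_artist; infer_instance

-- ===== CLAIM (what is proved, stated in full; the proofs are below) =====
def Claim_equal_fixed_artist : Prop := ∀ (artist : String), Dom_fixed_artist artist → Spec_fixed_artist artist (fixed_artist artist)

-- ===== LEMMAS AND PROOFS =====

-- chars that are printable (not category C) or whitespace: the invariant every
-- intermediate string of the computation keeps, implied by Dom_fixed_artist
def Qc (c : Char) : Bool := pvNotCatC c || PySem.Chars.isspace c

def AllQ (l : List Char) : Prop := ∀ c ∈ l, Qc c = true

-- the per-character action of A's lower+replace chain (proof-only abbreviation)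
def substc (a b c : Char) : Char := if c = a then b else c

def Fc (c : Char) : Char :=
  substc '’' '\'' (substc '}' ')' (substc '{' '(' (substc ']' ')'
    (substc '[' '(' (PySem.Chars.lowerChar c)))))

-- ---- small char facts ----

theorem char_eq_iff_toNat (c d : Char) : c = d ↔ c.toNat = d.toNat :=
  ⟨fun h => by rw [h], fun h => Char.ext (UInt32.toNat_inj.mp h)⟩

theorem isspace_iff (c : Char) : PySem.Chars.isspace c = true ↔
    (c.toNat = 32 ∨ (9 ≤ c.toNat ∧ c.toNat ≤ 13) ∨ (28 ≤ c.toNat ∧ c.toNat ≤ 31) ∨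
     c.toNat = 133 ∨ c.toNat = 160 ∨ c.toNat = 5760 ∨
     (8192 ≤ c.toNat ∧ c.toNat ≤ 8202) ∨ c.toNat = 8232 ∨ c.toNat = 8233 ∨
     c.toNat = 8239 ∨ c.toNat = 8287 ∨ c.toNat = 12288) := by
  simp [PySem.Chars.isspace]; tauto

theorem notCatC_iff (c : Char) : pvNotCatC c = true ↔ ¬ (c.toNat < 32 ∨ c.toNat = 127) := by
  simp [pvNotCatC]

theorem Qc_iff (c : Char) : Qc c = true ↔
    (¬ (c.toNat < 32 ∨ c.toNat = 127)) ∨ PySem.Chars.isspace c = true := by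
  unfold Qc
  rw [Bool.or_eq_true, notCatC_iff]

theorem toNat_lowerChar (c : Char) :
    (PySem.Chars.lowerChar c).toNat =
      if 65 ≤ c.toNat ∧ c.toNat ≤ 90 then c.toNat + 32 else c.toNat := by
  have hA : ('A' ≤ c) ↔ 65 ≤ c.toNat := by
    rw [Char.le_def, UInt32.le_iff_toNat_le]
    constructor <;> intro h <;> simpa using h
  have hZ : (c ≤ 'Z') ↔ c.toNat ≤ 90 := by
    rw [Char.le_def, UInt32.le_iff_toNat_le]
    constructor <;> intro h <;> simpa using h
  by_cases h : 65 ≤ c.toNat ∧ c.toNat ≤ 90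
  · have hb : PySem.Chars.isupper c = true := by
      unfold PySem.Chars.isupper
      simp [hA, hZ, h.1, h.2]
    unfold PySem.Chars.lowerChar
    rw [hb, if_pos rfl, if_pos h, Char.toNat_ofNat, if_pos]
    unfold Nat.isValidChar
    left; omega
  · have hb : PySem.Chars.isupper c = false := by
      unfold PySem.Chars.isupper
      rcases not_and_or.mp h with h1 | h1
      · simp [hA]; omega
      · simp [hZ]; intro _; omega
    unfold PySem.Chars.lowerChar
    rw [hb]
    simp only [Bool.false_eq_true, if_false]
    rw [if_neg h]

-- the per-character action, computed on code points
theorem Fc_spec (c : Char) : (Fc c).toNat =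
    (if c.toNat = 91 ∨ c.toNat = 123 then 40
     else if c.toNat = 93 ∨ c.toNat = 125 then 41
     else if c.toNat = 8217 then 39
     else if 65 ≤ c.toNat ∧ c.toNat ≤ 90 then c.toNat + 32 else c.toNat) := by
  by_cases h91 : c.toNat = 91
  · have hc : c = '[' := (char_eq_iff_toNat c '[').mpr h91
    subst hc; decide
  · by_cases h123 : c.toNat = 123
    · have hc : c = '{' := (char_eq_iff_toNat c '{').mpr h123
      subst hc; decide
    · by_cases h93 : c.toNat = 93
      · have hc : c = ']' := (char_eq_iff_toNat c ']').mpr h93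
        subst hc; decide
      · by_cases h125 : c.toNat = 125
        · have hc : c = '}' := (char_eq_iff_toNat c '}').mpr h125
          subst hc; decide
        · by_cases h8217 : c.toNat = 8217
          · have hc : c = '’' := (char_eq_iff_toNat c '’').mpr h8217
            subst hc; decide
          · have he := toNat_lowerChar c
            have he' : (65 ≤ c.toNat ∧ c.toNat ≤ 90 ∧ (PySem.Chars.lowerChar c).toNat = c.toNat + 32)
                ∨ (PySem.Chars.lowerChar c).toNat = c.toNat := by
              by_cases hu : 65 ≤ c.toNat ∧ c.toNat ≤ 90
              · exact Or.inl ⟨hu.1, hu.2, by rw [he, if_pos hu]⟩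
              · exact Or.inr (by rw [he, if_neg hu])
            have hlv : (PySem.Chars.lowerChar c).toNat ≠ 91 ∧
                (PySem.Chars.lowerChar c).toNat ≠ 93 ∧
                (PySem.Chars.lowerChar c).toNat ≠ 123 ∧
                (PySem.Chars.lowerChar c).toNat ≠ 125 ∧
                (PySem.Chars.lowerChar c).toNat ≠ 8217 := by omega
            have s1 : substc '[' '(' (PySem.Chars.lowerChar c) = PySem.Chars.lowerChar c := by
              unfold substc
              exact if_neg (fun hx => hlv.1 (by rw [hx]; rfl))
            have s2 : substc ']' ')' (PySem.Chars.lowerChar c) = PySem.Chars.lowerChar c := by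
              unfold substc
              exact if_neg (fun hx => hlv.2.1 (by rw [hx]; rfl))
            have s3 : substc '{' '(' (PySem.Chars.lowerChar c) = PySem.Chars.lowerChar c := by
              unfold substc
              exact if_neg (fun hx => hlv.2.2.1 (by rw [hx]; rfl))
            have s4 : substc '}' ')' (PySem.Chars.lowerChar c) = PySem.Chars.lowerChar c := by
              unfold substc
              exact if_neg (fun hx => hlv.2.2.2.1 (by rw [hx]; rfl))
            have s5 : substc '’' '\'' (PySem.Chars.lowerChar c) = PySem.Chars.lowerChar c := by
              unfold substc
              exact if_neg (fun hx => hlv.2.2.2.2 (by rw [hx]; rfl))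
            have hFc : Fc c = PySem.Chars.lowerChar c := by
              unfold Fc
              rw [s1, s2, s3, s4, s5]
            rw [hFc, he]
            split_ifs <;> omega

theorem isspace_Fc (c : Char) : PySem.Chars.isspace (Fc c) = PySem.Chars.isspace c := by
  have hn := Fc_spec c
  have hiff : (PySem.Chars.isspace (Fc c) = true) ↔ (PySem.Chars.isspace c = true) := by
    rw [isspace_iff, isspace_iff, hn]
    split_ifs <;> omega
  cases hb : PySem.Chars.isspace c with
  | true => exact hiff.mpr hb
  | false =>
    cases hb2 : PySem.Chars.isspace (Fc c) with
    | false => rfl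
    | true =>
      have hcontra := hiff.mp hb2
      rw [hb] at hcontra
      exact Bool.noConfusion hcontra

theorem Fc_space : Fc ' ' = ' ' := by decide

theorem Qc_Fc (c : Char) (h : Qc c = true) : Qc (Fc c) = true := by
  have hn := Fc_spec c
  rw [Qc_iff, isspace_iff, hn]
  rw [Qc_iff, isspace_iff] at h
  split_ifs <;> omega

theorem bTable_lowerChar (c : Char) (h : Qc c = true) :
    bTable (PySem.Chars.lowerChar c) = some (Fc c) := by
  by_cases h91 : c.toNat = 91
  · have hc : c = '[' := (char_eq_iff_toNat c '[').mpr h91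
    subst hc; decide
  · by_cases h123 : c.toNat = 123
    · have hc : c = '{' := (char_eq_iff_toNat c '{').mpr h123
      subst hc; decide
    · by_cases h93 : c.toNat = 93
      · have hc : c = ']' := (char_eq_iff_toNat c ']').mpr h93
        subst hc; decide
      · by_cases h125 : c.toNat = 125
        · have hc : c = '}' := (char_eq_iff_toNat c '}').mpr h125
          subst hc; decide
        · by_cases h8217 : c.toNat = 8217
          · have hc : c = '’' := (char_eq_iff_toNat c '’').mpr h8217
            subst hc; decide
          · have he := toNat_lowerChar c
            have he' : (65 ≤ c.toNat ∧ c.toNat ≤ 90 ∧ (PySem.Chars.lowerChar c).toNat = c.toNat + 32)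
                ∨ (PySem.Chars.lowerChar c).toNat = c.toNat := by
              by_cases hu : 65 ≤ c.toNat ∧ c.toNat ≤ 90
              · exact Or.inl ⟨hu.1, hu.2, by rw [he, if_pos hu]⟩
              · exact Or.inr (by rw [he, if_neg hu])
            have hlv : (PySem.Chars.lowerChar c).toNat ≠ 91 ∧
                (PySem.Chars.lowerChar c).toNat ≠ 93 ∧
                (PySem.Chars.lowerChar c).toNat ≠ 123 ∧
                (PySem.Chars.lowerChar c).toNat ≠ 125 ∧
                (PySem.Chars.lowerChar c).toNat ≠ 8217 := by omega
            have s1 : substc '[' '(' (PySem.Chars.lowerChar c) = PySem.Chars.lowerChar c := by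
              unfold substc
              exact if_neg (fun hx => hlv.1 (by rw [hx]; rfl))
            have s2 : substc ']' ')' (PySem.Chars.lowerChar c) = PySem.Chars.lowerChar c := by
              unfold substc
              exact if_neg (fun hx => hlv.2.1 (by rw [hx]; rfl))
            have s3 : substc '{' '(' (PySem.Chars.lowerChar c) = PySem.Chars.lowerChar c := by
              unfold substc
              exact if_neg (fun hx => hlv.2.2.1 (by rw [hx]; rfl))
            have s4 : substc '}' ')' (PySem.Chars.lowerChar c) = PySem.Chars.lowerChar c := by
              unfold substc
              exact if_neg (fun hx => hlv.2.2.2.1 (by rw [hx]; rfl))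
            have s5 : substc '’' '\'' (PySem.Chars.lowerChar c) = PySem.Chars.lowerChar c := by
              unfold substc
              exact if_neg (fun hx => hlv.2.2.2.2 (by rw [hx]; rfl))
            have hFc : Fc c = PySem.Chars.lowerChar c := by
              unfold Fc
              rw [s1, s2, s3, s4, s5]
            have hsp : PySem.Chars.isspace (PySem.Chars.lowerChar c) = PySem.Chars.isspace c := by
              rw [← hFc, isspace_Fc]
            have hcond : ((decide ((PySem.Chars.lowerChar c).toNat < 32) ||
                decide ((PySem.Chars.lowerChar c).toNat == 127)) &&
                !(PySem.Chars.isspace (PySem.Chars.lowerChar c))) = false := by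
              rcases (Qc_iff c).mp h with hq | hq
              · have h1 : decide ((PySem.Chars.lowerChar c).toNat < 32) = false := by
                  simp only [decide_eq_false_iff_not]
                  omega
                have h2 : decide ((PySem.Chars.lowerChar c).toNat == 127) = false := by
                  simp only [decide_eq_false_iff_not, beq_iff_eq]
                  omega
                rw [h1, h2]
                rfl
              · rw [hsp, hq]
                simp
            unfold bTable
            rw [if_neg (fun hx => hlv.1 (by rw [hx]; rfl)),
                if_neg (fun hx => hlv.2.1 (by rw [hx]; rfl)),
                if_neg (fun hx => hlv.2.2.1 (by rw [hx]; rfl)),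
                if_neg (fun hx => hlv.2.2.2.1 (by rw [hx]; rfl)),
                if_neg (fun hx => hlv.2.2.2.2 (by rw [hx]; rfl))]
            rw [hcond]
            simp [hFc]

theorem nonspace_Q_notCatC (c : Char) (hq : Qc c = true)
    (hs : PySem.Chars.isspace c = false) : pvNotCatC c = true := by
  unfold Qc at hq
  rcases Bool.or_eq_true _ _ |>.mp hq with h | h
  · exact h
  · rw [h] at hs; cases hs

-- ---- replace with single-char old/new is a map ----

theorem replace_go_single (a b : Char) :
    ∀ (fuel : Nat) (l acc : List Char), l.length ≤ fuel →
      PySem.Chars.replace.go [a] [b] fuel l acc = acc.reverse ++ l.map (substc a b) := by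
  intro fuel
  induction fuel with
  | zero =>
    intro l acc h
    have : l = [] := List.eq_nil_of_length_eq_zero (Nat.le_zero.mp h)
    subst this
    simp [PySem.Chars.replace.go]
  | succ n ih =>
    intro l acc h
    cases l with
    | nil => simp [PySem.Chars.replace.go]
    | cons c t =>
      rw [show PySem.Chars.replace.go [a] [b] (n+1) (c :: t) acc =
          (if [a].isPrefixOf (c :: t)
           then PySem.Chars.replace.go [a] [b] n (List.drop [a].length (c :: t)) ([b].reverse ++ acc)
           else PySem.Chars.replace.go [a] [b] n t (c :: acc)) from rfl]
      by_cases hc : a = c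
      · subst hc
        have hp : [a].isPrefixOf (a :: t) = true := by simp [List.isPrefixOf]
        rw [hp, if_pos rfl]
        rw [show List.drop [a].length (a :: t) = t from rfl]
        rw [ih t ([b].reverse ++ acc) (by simp at h ⊢; omega)]
        simp [substc]
      · have hp : [a].isPrefixOf (c :: t) = false := by
          simp [List.isPrefixOf]
          intro hh; exact absurd hh hc
        rw [hp]
        simp only [Bool.false_eq_true, if_false]
        rw [ih t (c :: acc) (by simp at h ⊢; omega)]
        have hsub : substc a b c = c := if_neg (fun hh => hc hh.symm)
        simp [hsub]

theorem replace_single (a b : Char) (l : List Char) :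
    PySem.Chars.replace l [a] [b] = l.map (substc a b) := by
  unfold PySem.Chars.replace
  simp only [List.isEmpty_cons, Bool.false_eq_true, if_false]
  exact replace_go_single a b l.length l [] (Nat.le_refl _)

-- ---- split₀ commutes with an isspace-preserving map ----

theorem split0_go_map (F : Char → Char) (hsp : ∀ c, PySem.Chars.isspace (F c) = PySem.Chars.isspace c) :
    ∀ (l cur : List Char) (acc : List (List Char)),
      PySem.Chars.split₀.go (l.map F) (cur.map F) (acc.map (List.map F))
        = (PySem.Chars.split₀.go l cur acc).map (List.map F) := by
  intro l
  induction l with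
  | nil =>
    intro cur acc
    rw [show (([] : List Char)).map F = [] from rfl]

    rw [show PySem.Chars.split₀.go [] (cur.map F) (acc.map (List.map F)) =
        (if (cur.map F).isEmpty then (acc.map (List.map F)).reverse
         else ((cur.map F).reverse :: acc.map (List.map F)).reverse) from rfl]
    rw [show PySem.Chars.split₀.go [] cur acc =
        (if cur.isEmpty then acc.reverse else (cur.reverse :: acc).reverse) from rfl]
    by_cases hc : cur.isEmpty <;> simp [hc]
  | cons c rest ih =>
    intro cur acc
    rw [show ((c :: rest).map F) = F c :: rest.map F from rfl]
    rw [show PySem.Chars.split₀.go (F c :: rest.map F) (cur.map F) (acc.map (List.map F)) =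
        (if PySem.Chars.isspace (F c)
         then (if (cur.map F).isEmpty then PySem.Chars.split₀.go (rest.map F) [] (acc.map (List.map F))
               else PySem.Chars.split₀.go (rest.map F) [] ((cur.map F).reverse :: acc.map (List.map F)))
         else PySem.Chars.split₀.go (rest.map F) (F c :: cur.map F) (acc.map (List.map F))) from rfl]
    rw [show PySem.Chars.split₀.go (c :: rest) cur acc =
        (if PySem.Chars.isspace c
         then (if cur.isEmpty then PySem.Chars.split₀.go rest [] acc
               else PySem.Chars.split₀.go rest [] (cur.reverse :: acc))
         else PySem.Chars.split₀.go rest (c :: cur) acc) from rfl]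
    rw [hsp c]
    by_cases hs : PySem.Chars.isspace c
    · rw [hs, if_pos rfl, if_pos rfl]
      by_cases hc : cur.isEmpty
      · rw [List.isEmpty_iff.mp hc]
        simp only [List.map_nil, List.isEmpty_nil, if_pos rfl]
        have := ih [] acc
        simpa using this
      · have hcf : cur.isEmpty = false := Bool.eq_false_iff.mpr hc
        have hcf2 : (cur.map F).isEmpty = false := by
          cases cur
          · cases hc rfl
          · rfl
        rw [hcf, hcf2]
        simp only [Bool.false_eq_true, if_false]
        have := ih [] (cur.reverse :: acc)
        simpa using this
    · have hsf : PySem.Chars.isspace c = false := Bool.eq_false_iff.mpr hs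
      rw [hsf]
      simp only [Bool.false_eq_true, if_false]
      have := ih (c :: cur) acc
      simpa using this

theorem split0_map (F : Char → Char) (hsp : ∀ c, PySem.Chars.isspace (F c) = PySem.Chars.isspace c)
    (l : List Char) :
    PySem.Chars.split₀ (l.map F) = (PySem.Chars.split₀ l).map (List.map F) := by
  unfold PySem.Chars.split₀
  have := split0_go_map F hsp l [] []
  simpa using this

-- chars of split₀'s parts are non-space chars of the input
theorem split0_go_mem :
    ∀ (l cur : List Char) (acc : List (List Char)) (p : List Char) (c : Char),
      p ∈ PySem.Chars.split₀.go l cur acc → c ∈ p →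
      c ∈ cur ∨ (c ∈ l ∧ PySem.Chars.isspace c = false) ∨ ∃ q ∈ acc, c ∈ q := by
  intro l
  induction l with
  | nil =>
    intro cur acc p c hp hc
    rw [show PySem.Chars.split₀.go [] cur acc =
        (if cur.isEmpty then acc.reverse else (cur.reverse :: acc).reverse) from rfl] at hp
    by_cases hcur : cur.isEmpty
    · rw [if_pos hcur] at hp
      exact Or.inr (Or.inr ⟨p, List.mem_reverse.mp hp, hc⟩)
    · rw [if_neg hcur] at hp
      rw [List.mem_reverse] at hp
      rcases List.mem_cons.mp hp with h1 | h2
      · subst h1; exact Or.inl (List.mem_reverse.mp hc)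
      · exact Or.inr (Or.inr ⟨p, h2, hc⟩)
  | cons d rest ih =>
    intro cur acc p c hp hc
    rw [show PySem.Chars.split₀.go (d :: rest) cur acc =
        (if PySem.Chars.isspace d
         then (if cur.isEmpty then PySem.Chars.split₀.go rest [] acc
               else PySem.Chars.split₀.go rest [] (cur.reverse :: acc))
         else PySem.Chars.split₀.go rest (d :: cur) acc) from rfl] at hp
    by_cases hs : PySem.Chars.isspace d
    · rw [if_pos hs] at hp
      by_cases hcur : cur.isEmpty
      · rw [if_pos hcur] at hp
        rcases ih [] acc p c hp hc with h1 | ⟨h2, h3⟩ | h4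
        · cases h1
        · exact Or.inr (Or.inl ⟨List.mem_cons_of_mem _ h2, h3⟩)
        · exact Or.inr (Or.inr h4)
      · rw [if_neg hcur] at hp
        rcases ih [] (cur.reverse :: acc) p c hp hc with h1 | ⟨h2, h3⟩ | ⟨q, hq, hcq⟩
        · cases h1
        · exact Or.inr (Or.inl ⟨List.mem_cons_of_mem _ h2, h3⟩)
        · rcases List.mem_cons.mp hq with h5 | h6
          · subst h5; exact Or.inl (List.mem_reverse.mp hcq)
          · exact Or.inr (Or.inr ⟨q, h6, hcq⟩)
    · rw [if_neg hs] at hp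
      rcases ih (d :: cur) acc p c hp hc with h1 | ⟨h2, h3⟩ | h4
      · rcases List.mem_cons.mp h1 with h5 | h6
        · subst h5
          exact Or.inr (Or.inl ⟨List.mem_cons_self .., Bool.eq_false_iff.mpr hs⟩)
        · exact Or.inl h6
      · exact Or.inr (Or.inl ⟨List.mem_cons_of_mem _ h2, h3⟩)
      · exact Or.inr (Or.inr h4)

theorem split0_mem (l : List Char) (p : List Char) (c : Char)
    (hp : p ∈ PySem.Chars.split₀ l) (hc : c ∈ p) :
    c ∈ l ∧ PySem.Chars.isspace c = false := by
  rcases split0_go_mem l [] [] p c hp hc with h1 | h2 | ⟨q, hq, _⟩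
  · cases h1
  · exact h2
  · cases hq

-- ---- join [' '] facts ----

theorem join_map (F : Char → Char) (hF : F ' ' = ' ') (parts : List (List Char)) :
    (PySem.Chars.join [' '] parts).map F = PySem.Chars.join [' '] (parts.map (List.map F)) := by
  induction parts with
  | nil => simp [PySem.Chars.join_nil]
  | cons p rest ih =>
    cases rest with
    | nil => simp [PySem.Chars.join_singleton]
    | cons q rest' =>
      rw [PySem.Chars.join_cons_cons, List.map_cons, List.map_cons, PySem.Chars.join_cons_cons]
      simp only [List.map_append]
      rw [ih]
      simp [hF]

theorem join_mem (parts : List (List Char)) (c : Char)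
    (h : c ∈ PySem.Chars.join [' '] parts) : c = ' ' ∨ ∃ p ∈ parts, c ∈ p := by
  induction parts with
  | nil => simp [PySem.Chars.join_nil] at h
  | cons p rest ih =>
    cases rest with
    | nil =>
      rw [PySem.Chars.join_singleton] at h
      exact Or.inr ⟨p, by simp, h⟩
    | cons q rest' =>
      rw [PySem.Chars.join_cons_cons] at h
      rcases List.mem_append.mp h with h1 | h2
      · rcases List.mem_append.mp h1 with h3 | h4
        · exact Or.inr ⟨p, by simp, h3⟩
        · exact Or.inl (by simpa using h4)
      · rcases ih h2 with h5 | ⟨r, hr, hc⟩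
        · exact Or.inl h5
        · refine Or.inr ⟨r, ?_, hc⟩
          exact List.mem_cons_of_mem _ hr

-- ---- the two cleaning functions agree on Q-strings ----

theorem filterMap_eq_map_of {α β : Type} (f : α → Option β) (g : α → β) (l : List α)
    (h : ∀ x ∈ l, f x = some (g x)) : l.filterMap f = l.map g := by
  induction l with
  | nil => rfl
  | cons x t ih =>
    rw [List.filterMap_cons, h x (List.mem_cons_self ..), List.map_cons,
      ih (fun y hy => h y (List.mem_cons_of_mem _ hy))]

set_option maxHeartbeats 1000000 in
theorem fixed_string_toList (s : String) :
    (fixed_string s).toList =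
      ((PySem.Chars.join [' '] (PySem.Chars.split₀ s.toList)).filter pvNotCatC).map Fc := by
  unfold fixed_string
  simp only [PySem.Str.toList_replace, PySem.Str.toList_lower, String.toList_ofList,
    PySem.Str.toList_join]
  rw [PySem.Str.split₀_map_toList]
  rw [show ("’" : String).toList = ['’'] from rfl, show ("'" : String).toList = ['\''] from rfl,
    show ("}" : String).toList = ['}'] from rfl, show (")" : String).toList = [')'] from rfl,
    show ("{" : String).toList = ['{'] from rfl, show ("(" : String).toList = ['('] from rfl,
    show ("]" : String).toList = [']'] from rfl, show ("[" : String).toList = ['['] from rfl,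
    show (" " : String).toList = [' '] from rfl]
  rw [replace_single, replace_single, replace_single, replace_single, replace_single]
  unfold PySem.Chars.lower
  simp only [List.map_map]
  apply List.map_congr_left
  intro x _
  rfl

theorem bClean_toList (s : String) :
    (bClean s).toList =
      PySem.Chars.join [' ']
        (PySem.Chars.split₀ ((s.toList.map PySem.Chars.lowerChar).filterMap bTable)) := by
  unfold bClean
  simp only [PySem.Str.toList_join, PySem.Str.toList_lower]
  rw [PySem.Str.split₀_map_toList]
  rw [show (" " : String).toList = [' '] from rfl, String.toList_ofList]
  rfl

theorem clean_eq (s : String) (h : AllQ s.toList) : fixed_string s = bClean s := by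
  apply String.toList_inj.mp
  rw [fixed_string_toList, bClean_toList]
  have hfm : (s.toList.map PySem.Chars.lowerChar).filterMap bTable = s.toList.map Fc := by
    rw [List.filterMap_map]
    exact filterMap_eq_map_of _ _ _ (fun c hc => bTable_lowerChar c (h c hc))
  rw [hfm]
  have hfilter : (PySem.Chars.join [' '] (PySem.Chars.split₀ s.toList)).filter pvNotCatC
      = PySem.Chars.join [' '] (PySem.Chars.split₀ s.toList) := by
    apply List.filter_eq_self.mpr
    intro c hc
    rcases join_mem _ c hc with h1 | ⟨p, hp, hcp⟩
    · subst h1; decide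
    · have := split0_mem s.toList p c hp hcp
      exact nonspace_Q_notCatC c (h c this.1) this.2
  rw [hfilter]
  rw [join_map Fc Fc_space]
  rw [← split0_map Fc isspace_Fc]

-- ---- first occurrence of a single character ----

theorem find_single_decomp (a : Char) (l : List Char) (h : a ∈ l) :
    ∃ t r : List Char, l = t ++ a :: r ∧ a ∉ t ∧
      PySem.Chars.find l [a] = (t.length : Int) := by
  have hnn : 0 ≤ PySem.Chars.find l [a] :=
    (PySem.Chars.find_nonneg_iff _ _).mpr ((List.singleton_infix_iff a l).mpr h)
  obtain ⟨hpre, hmin⟩ := PySem.Chars.find_spec hnn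
  set k := (PySem.Chars.find l [a]).toNat with hk
  obtain ⟨u, hu⟩ := hpre
  have hkle : k ≤ l.length := by
    by_contra hgt
    rw [List.drop_eq_nil_of_le (le_of_lt (Nat.lt_of_not_le hgt))] at hu
    simp at hu
  refine ⟨l.take k, u, ?_, ?_, ?_⟩
  · conv_lhs => rw [← List.take_append_drop k l]
    rw [← hu]
    rfl
  · intro hmem
    obtain ⟨j, hj, hje⟩ := List.mem_iff_getElem.mp hmem
    have hj' := hj
    simp at hj'
    have hjk : j < k := hj'.1
    apply hmin j hjk
    have hjl : j < l.length := lt_of_lt_of_le hjk hkle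
    rw [List.drop_eq_getElem_cons hjl]
    have hlj : l[j] = a := by
      rw [← hje]
      simp [List.getElem_take]
    rw [hlj]
    exact ⟨_, rfl⟩
  · have hlen : (l.take k).length = k := by simp [hkle]
    rw [hlen, hk, Int.toNat_of_nonneg hnn]

-- ---- splitOnMax with maxsplit 1 and a single-char separator ----

theorem splitOnMax_go_zero (a : Char) (fuel : Nat) (l cur : List Char) (acc : List (List Char)) :
    PySem.Chars.splitOnMax.go [a] fuel 0 l cur acc = ((cur.reverse ++ l) :: acc).reverse := by
  cases fuel with
  | zero => rfl
  | succ n =>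
    cases l with
    | nil => simp [show PySem.Chars.splitOnMax.go [a] (n+1) 0 [] cur acc
        = (cur.reverse :: acc).reverse from rfl]
    | cons c t =>
      rw [show PySem.Chars.splitOnMax.go [a] (n+1) 0 (c :: t) cur acc =
          (if (0 : Nat) = 0 then ((cur.reverse ++ (c :: t)) :: acc).reverse
           else if [a].isPrefixOf (c :: t)
                then PySem.Chars.splitOnMax.go [a] n (0-1) (List.drop [a].length (c :: t)) [] (cur.reverse :: acc)
                else PySem.Chars.splitOnMax.go [a] n 0 t (c :: cur) acc) from rfl]
      rw [if_pos rfl]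

theorem splitOnMax_go_no (a : Char) :
    ∀ (l : List Char), a ∉ l → ∀ (fuel : Nat) (cur : List Char) (acc : List (List Char)),
      l.length < fuel →
      PySem.Chars.splitOnMax.go [a] fuel 1 l cur acc = ((cur.reverse ++ l) :: acc).reverse := by
  intro l
  induction l with
  | nil =>
    intro _ fuel cur acc hf
    cases fuel with
    | zero => omega
    | succ n =>
      simp [show PySem.Chars.splitOnMax.go [a] (n+1) 1 [] cur acc
        = (cur.reverse :: acc).reverse from rfl]
  | cons c t ih =>
    intro hna fuel cur acc hf
    cases fuel with
    | zero => simp at hf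
    | succ n =>
      rw [show PySem.Chars.splitOnMax.go [a] (n+1) 1 (c :: t) cur acc =
          (if (1 : Nat) = 0 then ((cur.reverse ++ (c :: t)) :: acc).reverse
           else if [a].isPrefixOf (c :: t)
                then PySem.Chars.splitOnMax.go [a] n (1-1) (List.drop [a].length (c :: t)) [] (cur.reverse :: acc)
                else PySem.Chars.splitOnMax.go [a] n 1 t (c :: cur) acc) from rfl]
      have hne : a ≠ c := fun he => hna (he ▸ List.mem_cons_self ..)
      have hp : [a].isPrefixOf (c :: t) = false := by
        simp [List.isPrefixOf]
        intro hh; exact absurd hh hne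
      rw [if_neg (by omega), hp]
      simp only [Bool.false_eq_true, if_false]
      rw [ih (fun hm => hna (List.mem_cons_of_mem _ hm)) n (c :: cur) acc (by simp at hf ⊢; omega)]
      simp

theorem splitOnMax_go_yes (a : Char) :
    ∀ (t : List Char), a ∉ t → ∀ (r : List Char) (fuel : Nat) (cur : List Char) (acc : List (List Char)),
      (t ++ a :: r).length < fuel →
      PySem.Chars.splitOnMax.go [a] fuel 1 (t ++ a :: r) cur acc
        = (r :: (cur.reverse ++ t) :: acc).reverse := by
  intro t
  induction t with
  | nil =>
    intro _ r fuel cur acc hf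
    cases fuel with
    | zero => simp at hf
    | succ n =>
      rw [show ([] : List Char) ++ a :: r = a :: r from rfl]
      rw [show PySem.Chars.splitOnMax.go [a] (n+1) 1 (a :: r) cur acc =
          (if (1 : Nat) = 0 then ((cur.reverse ++ (a :: r)) :: acc).reverse
           else if [a].isPrefixOf (a :: r)
                then PySem.Chars.splitOnMax.go [a] n (1-1) (List.drop [a].length (a :: r)) [] (cur.reverse :: acc)
                else PySem.Chars.splitOnMax.go [a] n 1 r (a :: cur) acc) from rfl]
      have hp : [a].isPrefixOf (a :: r) = true := by simp [List.isPrefixOf]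
      rw [if_neg (by omega), hp, if_pos rfl]
      rw [show List.drop [a].length (a :: r) = r from rfl]
      rw [show (1 : Nat) - 1 = 0 from rfl]
      rw [splitOnMax_go_zero]
      simp
  | cons c t' ih =>
    intro hna r fuel cur acc hf
    cases fuel with
    | zero => simp at hf
    | succ n =>
      rw [show (c :: t') ++ a :: r = c :: (t' ++ a :: r) from rfl]
      rw [show PySem.Chars.splitOnMax.go [a] (n+1) 1 (c :: (t' ++ a :: r)) cur acc =
          (if (1 : Nat) = 0 then ((cur.reverse ++ (c :: (t' ++ a :: r))) :: acc).reverse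
           else if [a].isPrefixOf (c :: (t' ++ a :: r))
                then PySem.Chars.splitOnMax.go [a] n (1-1) (List.drop [a].length (c :: (t' ++ a :: r))) [] (cur.reverse :: acc)
                else PySem.Chars.splitOnMax.go [a] n 1 (t' ++ a :: r) (c :: cur) acc) from rfl]
      have hne : a ≠ c := fun he => hna (he ▸ List.mem_cons_self ..)
      have hp : [a].isPrefixOf (c :: (t' ++ a :: r)) = false := by
        simp [List.isPrefixOf]
        intro hh; exact absurd hh hne
      rw [if_neg (by omega), hp]
      simp only [Bool.false_eq_true, if_false]
      rw [ih (fun hm => hna (List.mem_cons_of_mem _ hm)) r n (c :: cur) acc (by simp at hf ⊢; omega)]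
      simp

theorem splitOnMax_one_no (a : Char) (l : List Char) (h : a ∉ l) :
    PySem.Chars.splitOnMax l [a] 1 = [l] := by
  unfold PySem.Chars.splitOnMax
  rw [if_neg (by norm_num)]
  rw [show ((1 : Int)).toNat = 1 from rfl]
  rw [splitOnMax_go_no a l h (l.length + 1) [] [] (Nat.lt_succ_self _)]
  simp

theorem splitOnMax_one_yes (a : Char) (t r : List Char) (h : a ∉ t) :
    PySem.Chars.splitOnMax (t ++ a :: r) [a] 1 = [t, r] := by
  unfold PySem.Chars.splitOnMax
  rw [if_neg (by norm_num)]
  rw [show ((1 : Int)).toNat = 1 from rfl]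
  rw [splitOnMax_go_yes a t h r ((t ++ a :: r).length + 1) [] [] (Nat.lt_succ_self _)]
  simp

-- ---- chars of splitOn's parts come from the input ----

theorem splitOn_go_mem (sep : List Char) :
    ∀ (fuel : Nat) (l cur : List Char) (acc : List (List Char)) (p : List Char) (c : Char),
      p ∈ PySem.Chars.splitOn.go sep fuel l cur acc → c ∈ p →
      c ∈ cur ∨ c ∈ l ∨ ∃ q ∈ acc, c ∈ q := by
  intro fuel
  induction fuel with
  | zero =>
    intro l cur acc p c hp hc
    rw [show PySem.Chars.splitOn.go sep 0 l cur acc = ((cur.reverse ++ l) :: acc).reverse from rfl] at hp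
    rw [List.mem_reverse] at hp
    rcases List.mem_cons.mp hp with h1 | h2
    · subst h1
      rcases List.mem_append.mp hc with h3 | h4
      · exact Or.inl (List.mem_reverse.mp h3)
      · exact Or.inr (Or.inl h4)
    · exact Or.inr (Or.inr ⟨p, h2, hc⟩)
  | succ n ih =>
    intro l cur acc p c hp hc
    cases l with
    | nil =>
      rw [show PySem.Chars.splitOn.go sep (n+1) [] cur acc = (cur.reverse :: acc).reverse from rfl] at hp
      rw [List.mem_reverse] at hp
      rcases List.mem_cons.mp hp with h1 | h2
      · subst h1; exact Or.inl (List.mem_reverse.mp hc)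
      · exact Or.inr (Or.inr ⟨p, h2, hc⟩)
    | cons d rest =>
      rw [show PySem.Chars.splitOn.go sep (n+1) (d :: rest) cur acc =
          (if sep.isPrefixOf (d :: rest)
           then PySem.Chars.splitOn.go sep n (List.drop sep.length (d :: rest)) [] (cur.reverse :: acc)
           else PySem.Chars.splitOn.go sep n rest (d :: cur) acc) from rfl] at hp
      by_cases hpre : sep.isPrefixOf (d :: rest)
      · rw [if_pos hpre] at hp
        rcases ih _ _ _ p c hp hc with h1 | h2 | ⟨q, hq, hcq⟩
        · cases h1
        · exact Or.inr (Or.inl (List.drop_subset _ _ h2))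
        · rcases List.mem_cons.mp hq with h5 | h6
          · subst h5; exact Or.inl (List.mem_reverse.mp hcq)
          · exact Or.inr (Or.inr ⟨q, h6, hcq⟩)
      · rw [if_neg hpre] at hp
        rcases ih _ _ _ p c hp hc with h1 | h2 | h4
        · rcases List.mem_cons.mp h1 with h5 | h6
          · subst h5; exact Or.inr (Or.inl (List.mem_cons_self ..))
          · exact Or.inl h6
        · exact Or.inr (Or.inl (List.mem_cons_of_mem _ h2))
        · exact Or.inr (Or.inr h4)

theorem splitOn_mem (l sep : List Char) (p : List Char) (c : Char)
    (hp : p ∈ PySem.Chars.splitOn l sep) (hc : c ∈ p) : c ∈ l := by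
  unfold PySem.Chars.splitOn at hp
  rcases splitOn_go_mem sep (l.length + 1) l [] [] p c hp hc with h1 | h2 | ⟨q, hq, _⟩
  · cases h1
  · exact h2
  · cases hq

-- ---- pyGetD helpers ----

theorem pyGetD_mem_or {α : Type} (l : List α) (i : Int) (d : α) :
    PySem.List.pyGetD l i d = d ∨ PySem.List.pyGetD l i d ∈ l := by
  unfold PySem.List.pyGetD PySem.List.pyGet? PySem.List.pyIdx?
  split_ifs with h1 h2 h3
  · cases hg : l[i.toNat]? with
    | none => left; simp [hg]
    | some x =>
      right
      have := List.mem_of_getElem? hg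
      simpa [hg] using this
  · left; rfl
  · cases hg : l[l.length - (-i).toNat]? with
    | none => left; simp [hg]
    | some x =>
      right
      have := List.mem_of_getElem? hg
      simpa [hg] using this
  · left; rfl

theorem pyGetD_pair_last {α : Type} (x y : α) (d : α) :
    PySem.List.pyGetD [x, y] (-1) d = y := by
  unfold PySem.List.pyGetD PySem.List.pyGet? PySem.List.pyIdx?
  norm_num

theorem pyGetD_single_last {α : Type} (x : α) (d : α) :
    PySem.List.pyGetD [x] (-1) d = x := by
  unfold PySem.List.pyGetD PySem.List.pyGet? PySem.List.pyIdx?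
  norm_num

-- ---- Q preservation ----

theorem allQ_fixed_string (s : String) (h : AllQ s.toList) : AllQ (fixed_string s).toList := by
  rw [fixed_string_toList]
  intro c hc
  rw [List.mem_map] at hc
  obtain ⟨d, hd, hdc⟩ := hc
  have hd2 := List.mem_of_mem_filter hd
  subst hdc
  apply Qc_Fc
  rcases join_mem _ d hd2 with h1 | ⟨p, hp, hdp⟩
  · subst h1; decide
  · exact h d (split0_mem s.toList p d hp hdp).1

theorem allQ_splitDashLast (s : String) (h : AllQ s.toList) : AllQ (pvSplitDashLast s).toList := by
  unfold pvSplitDashLast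
  have hsp : PySem.Str.split? s " - "
      = some ((PySem.Chars.splitOn s.toList [' ', '-', ' ']).map String.ofList) := by
    unfold PySem.Str.split? PySem.Chars.split?
    rfl
  rw [hsp]
  rw [show (some ((PySem.Chars.splitOn s.toList [' ', '-', ' ']).map String.ofList)).getD []
      = (PySem.Chars.splitOn s.toList [' ', '-', ' ']).map String.ofList from rfl]
  rcases pyGetD_mem_or ((PySem.Chars.splitOn s.toList [' ', '-', ' ']).map String.ofList) (-1) "" with he | hm
  · rw [he]; intro c hc; cases hc
  · rw [List.mem_map] at hm
    obtain ⟨p, hp, hpe⟩ := hm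
    rw [← hpe]
    intro c hc
    rw [String.toList_ofList] at hc
    exact h c (splitOn_mem s.toList [' ', '-', ' '] p c hp hc)

-- ---- the cut step: description of pvDropParen, agreement with B's slices ----

theorem hasParens_mem (a : String) (h : pvHasParens a = true) : '(' ∈ a.toList := by
  unfold pvHasParens at h
  have h1 := (Bool.and_eq_true _ _).mp h |>.1
  have := (PySem.Str.isIn_iff_infix _ _).mp h1
  rw [show ("(" : String).toList = ['('] from rfl] at this
  exact (List.singleton_infix_iff _ _).mp this

-- both the value of pvDropParen and its agreement with Source B's index-based cut
set_option maxHeartbeats 1000000 in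
theorem cut_spec (a : String) (h : pvHasParens a = true) :
    String.ofList ((PySem.Str.slice a none (some (PySem.Str.find a "("))).toList ++
      (if PySem.Str.findFrom a ")" (PySem.Str.find a "(" + 1) != -1
       then PySem.Str.slice a (some (PySem.Str.findFrom a ")" (PySem.Str.find a "(" + 1) + 1)) none
       else PySem.Str.slice a (some (PySem.Str.find a "(" + 1)) none).toList)
    = pvDropParen a
    ∧ ∀ c ∈ (pvDropParen a).toList, c ∈ a.toList := by
  obtain ⟨t, r, hdec, hnt, hfind⟩ := find_single_decomp '(' a.toList (hasParens_mem a h)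
  -- A's first split
  have hsm : PySem.Str.splitMax? a "(" 1 = some [String.ofList t, String.ofList r] := by
    unfold PySem.Str.splitMax? PySem.Chars.splitMax?
    rw [show ("(" : String).toList = ['('] from rfl]
    rw [if_neg (by decide)]
    rw [hdec, splitOnMax_one_yes '(' t r hnt]
    rfl
  have hfind' : PySem.Str.find a "(" = (t.length : Int) := by
    unfold PySem.Str.find
    rw [show ("(" : String).toList = ['('] from rfl]
    exact hfind
  -- B's head slice
  have hslice1 : (PySem.Str.slice a none (some (PySem.Str.find a "("))).toList = t := by
    unfold PySem.Str.slice
    rw [String.toList_ofList, PySem.Chars.slice_eq_listSlice, hfind',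
      PySem.List.slice_to a.toList (b := (t.length : Int)) (by omega)]
    rw [show ((t.length : Int)).toNat = t.length from rfl, hdec, List.take_left]
  -- findFrom in terms of find on r
  have hlen : t.length + 1 ≤ a.toList.length := by
    rw [hdec]; simp
  have hdrop : a.toList.drop (t.length + 1) = r := by
    rw [hdec, show t ++ '(' :: r = (t ++ ['(']) ++ r by simp,
      show t.length + 1 = (t ++ ['(']).length by simp]
    exact List.drop_left
  have hff : PySem.Str.findFrom a ")" (PySem.Str.find a "(" + 1)
      = (if PySem.Chars.find r [')'] = -1 then -1
         else ((t.length + 1 : Nat) : Int) + PySem.Chars.find r [')']) := by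
    unfold PySem.Str.findFrom
    rw [show (")" : String).toList = [')'] from rfl, hfind']
    rw [show (t.length : Int) + 1 = ((t.length + 1 : Nat) : Int) by push_cast; ring]
    rw [PySem.Chars.findFrom_natCast a.toList [')'] (t.length + 1) hlen, hdrop]
  by_cases hr : ')' ∈ r
  · obtain ⟨t2, r2, hdec2, hnt2, hfind2⟩ := find_single_decomp ')' r hr
    have hsm2 : PySem.Str.splitMax? (String.ofList r) ")" 1
        = some [String.ofList t2, String.ofList r2] := by
      unfold PySem.Str.splitMax? PySem.Chars.splitMax?
      rw [show (")" : String).toList = [')'] from rfl, String.toList_ofList]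
      rw [if_neg (by decide)]
      rw [hdec2, splitOnMax_one_yes ')' t2 r2 hnt2]
      rfl
    have hA : (pvDropParen a).toList = t ++ r2 := by
      simp only [pvDropParen, hsm, Option.getD_some, List.getD_cons_zero, List.getD_cons_succ,
        hsm2, pyGetD_pair_last, String.toList_ofList]
    have hffv : PySem.Str.findFrom a ")" (PySem.Str.find a "(" + 1)
        = ((t.length + 1 + t2.length : Nat) : Int) := by
      rw [hff, if_neg (by rw [hfind2]; omega), hfind2]
      push_cast; ring
    have hslice2 : (PySem.Str.slice a (some (((t.length + 1 + t2.length : Nat) : Int) + 1)) none).toList = r2 := by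
      unfold PySem.Str.slice
      rw [String.toList_ofList, PySem.Chars.slice_eq_listSlice,
        PySem.List.slice_from a.toList (a := (((t.length + 1 + t2.length : Nat) : Int) + 1)) (by omega)]
      rw [show ((((t.length + 1 + t2.length : Nat) : Int)) + 1).toNat = t.length + 1 + t2.length + 1 by omega]
      rw [hdec, hdec2]
      rw [show t ++ '(' :: (t2 ++ ')' :: r2) = (t ++ ['('] ++ t2 ++ [')']) ++ r2 by simp,
        show t.length + 1 + t2.length + 1 = (t ++ ['('] ++ t2 ++ [')']).length by simp; omega]
      exact List.drop_left
    refine ⟨?_, ?_⟩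
    · apply String.toList_inj.mp
      rw [hA, String.toList_ofList, hffv]
      rw [if_pos (by rw [bne_iff_ne]; omega)]
      rw [hslice1, hslice2]
    · intro c hc
      rw [hA] at hc
      rw [hdec, hdec2]
      rcases List.mem_append.mp hc with h1 | h2
      · exact List.mem_append.mpr (Or.inl h1)
      · refine List.mem_append.mpr (Or.inr ?_)
        refine List.mem_cons_of_mem _ ?_
        refine List.mem_append.mpr (Or.inr ?_)
        exact List.mem_cons_of_mem _ h2
  · have hsm2 : PySem.Str.splitMax? (String.ofList r) ")" 1 = some [String.ofList r] := by
      unfold PySem.Str.splitMax? PySem.Chars.splitMax?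
      rw [show (")" : String).toList = [')'] from rfl, String.toList_ofList]
      rw [if_neg (by decide)]
      rw [splitOnMax_one_no ')' r hr]
      rfl
    have hA : (pvDropParen a).toList = t ++ r := by
      simp only [pvDropParen, hsm, Option.getD_some, List.getD_cons_zero, List.getD_cons_succ,
        hsm2, pyGetD_single_last, String.toList_ofList]
    have hfr : PySem.Chars.find r [')'] = -1 := by
      rw [PySem.Chars.find_eq_neg_one_iff]
      intro hinf
      exact hr ((List.singleton_infix_iff _ _).mp hinf)
    have hffv : PySem.Str.findFrom a ")" (PySem.Str.find a "(" + 1) = -1 := by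
      rw [hff, if_pos hfr]
    have hslice2 : (PySem.Str.slice a (some (PySem.Str.find a "(" + 1)) none).toList = r := by
      unfold PySem.Str.slice
      rw [String.toList_ofList, PySem.Chars.slice_eq_listSlice, hfind',
        PySem.List.slice_from a.toList (a := ((t.length : Int) + 1)) (by omega)]
      rw [show ((t.length : Int) + 1).toNat = t.length + 1 by omega]
      exact hdrop
    refine ⟨?_, ?_⟩
    · apply String.toList_inj.mp
      rw [hA, String.toList_ofList, hffv]
      rw [if_neg (by decide)]
      rw [hslice1, hslice2]
    · intro c hc
      rw [hA] at hc
      rw [hdec]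
      rcases List.mem_append.mp hc with h1 | h2
      · exact List.mem_append.mpr (Or.inl h1)
      · exact List.mem_append.mpr (Or.inr (List.mem_cons_of_mem _ h2))

theorem allQ_dropParen (a : String) (hq : AllQ a.toList) (h : pvHasParens a = true) :
    AllQ (pvDropParen a).toList :=
  fun c hc => hq c ((cut_spec a h).2 c hc)

theorem cond_eq (a : String) :
    (PySem.Str.find a "(" != -1 && PySem.Str.isIn ")" a) = pvHasParens a := rfl

-- ---- strip is idempotent ----

theorem chars_strip_idem (l : List Char) :
    PySem.Chars.strip (PySem.Chars.strip l) = PySem.Chars.strip l := by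
  show PySem.Chars.rstrip (PySem.Chars.lstrip (PySem.Chars.rstrip (PySem.Chars.lstrip l)))
      = PySem.Chars.rstrip (PySem.Chars.lstrip l)
  have hr : ∀ t : List Char, PySem.Chars.rstrip t = List.rdropWhile PySem.Chars.isspace t :=
    fun t => rfl
  set p := PySem.Chars.isspace
  set u := PySem.Chars.lstrip l with hu
  have hfix : List.dropWhile p (List.rdropWhile p u) = List.rdropWhile p u := by
    rw [List.dropWhile_eq_self_iff]
    intro hl hp
    have hpre : List.rdropWhile p u <+: u := List.rdropWhile_prefix p u
    have hlen : 0 < u.length := lt_of_lt_of_le hl hpre.length_le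
    have h0 : (List.rdropWhile p u)[0]'hl = u[0]'hlen := hpre.getElem hl
    have hnot := List.dropWhile_get_zero_not p l (by
      simpa [hu, PySem.Chars.lstrip] using hlen)
    rw [h0] at hp
    exact hnot (by simpa [hu, PySem.Chars.lstrip] using hp)
  calc PySem.Chars.rstrip (PySem.Chars.lstrip (PySem.Chars.rstrip u))
      = List.rdropWhile p (List.dropWhile p (List.rdropWhile p u)) := by rw [hr]; rfl
    _ = List.rdropWhile p (List.rdropWhile p u) := by rw [hfix]
    _ = List.rdropWhile p u := List.rdropWhile_idempotent p u
    _ = PySem.Chars.rstrip u := (hr u).symm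

theorem str_strip_idem (s : String) :
    PySem.Str.strip (PySem.Str.strip s) = PySem.Str.strip s := by
  simp [PySem.Str.strip, chars_strip_idem]

-- ---- the main induction: A's recursion = B's loop + one strip, fuel for fuel ----

theorem go_eq_loop (n : Nat) (a : String) (hq : AllQ a.toList) :
    fixed_artist_go n a
      = PySem.Str.strip (bLoop n (pvSplitDashLast (bClean a))) := by
  induction n generalizing a with
  | zero =>
    rw [fixed_artist_go, bLoop, clean_eq a hq]
  | succ n ih =>
    simp only [fixed_artist_go, bLoop, ← clean_eq a hq, cond_eq]
    by_cases h : pvHasParens (pvSplitDashLast (fixed_string a)) = true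
    · simp only [h, if_true]
      have hqt : AllQ (pvSplitDashLast (fixed_string a)).toList :=
        allQ_splitDashLast _ (allQ_fixed_string a hq)
      rw [(cut_spec _ h).1]
      rw [ih _ (allQ_dropParen _ hqt h), str_strip_idem]
    · simp [eq_false_of_ne_true h]

-- ---- Dom implies the invariant ----

theorem dom_q (c : Char) (h : pvDomChar c = true) : Qc c = true := by
  unfold pvDomChar at h
  rw [Qc_iff, isspace_iff]
  simp only [Bool.or_eq_true, Bool.and_eq_true, decide_eq_true_eq, beq_iff_eq] at h
  omega

-- ===== VERDICT (by name: the statement is the Claim_ definition above) =====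
theorem fixed_artist_spec : Claim_equal_fixed_artist := by
  intro artist hdom
  unfold Spec_fixed_artist fixed_artist fixed_artist_alt
  apply go_eq_loop
  intro c hc
  apply dom_q
  unfold Dom_fixed_artist pvDomStr at hdom
  exact List.all_eq_true.mp hdom c hc
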